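-- pv_equiv track=rewrite | github.com/ByeongGil-Jung/2018-Artificial-Intelligence | PBL_2/entire_prediction_code(parallel).py | draw_to_end
-- ===== SOURCE A (Python) =====
-- def draw_to_end(image_input):
--     image = image_input
--     new_image = []
--     for row in image:
--         new_row = list(row)
--         threshold = 128
--         start_point = 0
--         last_point = 0
--         for i in range(len(row)):
--             if row[i] > threshold:
--                 start_point = i
--                 break
--         for i in reversed(range(len(row))):
--             if row[i] > threshold:
--                 last_point = i
--                 break
--         for i in range(start_point, last_point):
--             new_row[i] = 255
--         new_image += new_row
--     return new_image
-- ===== SOURCE B (Python) =====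
-- def _fill_row(row):
--     first = None
--     last = 0
--     for i, v in enumerate(row):
--         if v > 128:
--             if first is None:
--                 first = i
--             last = i
--     start = first if first is not None else 0
--     return row[:start] + [255] * (last - start) + row[last:]
--
--
-- def draw_to_end(image_input):
--     return [v for row in image_input for v in _fill_row(row)]
-- ===== Notes on version B (the rewrite author's own statement) =====
-- stated objective: simpler
-- what changed: A's three per-row index loops (forward break-scan, reversed break-scan, fill loop with per-index assignment) are replaced by one enumerate pass recording the first and last bright index plus a single slice splice row[:start] + [255]*(last-start) + row[last:], and the row-flattening accumulator loop becomes a flat comprehension.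
import Mathlib
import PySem

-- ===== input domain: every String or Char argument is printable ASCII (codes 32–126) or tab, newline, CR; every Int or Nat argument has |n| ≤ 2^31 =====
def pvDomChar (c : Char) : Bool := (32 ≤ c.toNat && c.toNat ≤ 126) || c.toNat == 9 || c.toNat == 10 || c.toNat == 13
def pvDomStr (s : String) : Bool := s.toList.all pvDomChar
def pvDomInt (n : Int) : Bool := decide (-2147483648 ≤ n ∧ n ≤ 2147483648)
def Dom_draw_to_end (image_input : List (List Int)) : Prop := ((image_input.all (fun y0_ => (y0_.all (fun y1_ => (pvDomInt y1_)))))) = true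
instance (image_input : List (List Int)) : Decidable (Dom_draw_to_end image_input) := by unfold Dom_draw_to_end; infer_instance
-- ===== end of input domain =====

-- B replaces A's three index loops per row by one enumerate pass recording the first/last
-- bright index plus a single slice splice (take ++ replicate ++ drop); same output.

-- ===== PORT A =====
-- the two 'for … break' index scans of A: first element of the given index list whose pixel
-- exceeds the threshold, else the initial 0
def pvScanBreak (row : List Int) : List Int → Int
  | [] => 0
  | i :: is => if 128 < PySem.List.pyGetD row i 0 then i else pvScanBreak row is

def draw_to_end (image_input : List (List Int)) : List Int :=
  image_input.foldl (fun new_image row =>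
    let start_point := pvScanBreak row (PySem.List.pyRange 0 row.length)
    let last_point := pvScanBreak row (PySem.List.pyRange 0 row.length).reverse
    let new_row := (PySem.List.pyRange start_point last_point).foldl
        (fun nr i => PySem.List.pySetD nr i 255) row
    new_image ++ new_row) []

-- ===== PORT B =====
-- _fill_row of Source B: one enumerate pass, then row[:start] + [255]*(last-start) + row[last:]
def pvFillRow (row : List Int) : List Int :=
  let p := (PySem.List.enumerate row).foldl
      (fun (p : Option Int × Int) iv =>
        if 128 < iv.2 then ((if p.1 = none then some iv.1 else p.1), iv.1) else p)
      (none, 0)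
  let start := p.1.getD 0
  PySem.List.slice row none (some start) ++ List.replicate (p.2 - start).toNat 255
    ++ PySem.List.slice row (some p.2) none

def draw_to_end_alt (image_input : List (List Int)) : List Int :=
  image_input.flatMap pvFillRow

-- ===== PRECONDITION & SPEC =====
def Spec_draw_to_end (image_input : List (List Int)) (out : List Int) : Prop := out = draw_to_end_alt image_input
instance (image_input : List (List Int)) (out : List Int) : Decidable (Spec_draw_to_end image_input out) := by unfold Spec_draw_to_end; infer_instance

-- ===== CLAIM (what is proved, stated in full; the proofs are below) =====
def Claim_equal_draw_to_end : Prop := ∀ (image_input : List (List Int)), Dom_draw_to_end image_input → Spec_draw_to_end image_input (draw_to_end image_input)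

-- ===== LEMMAS AND PROOFS =====

-- the step function of B's single pass (same lambda as in pvFillRow)
def pvStep (p : Option Int × Int) (iv : Int × Int) : Option Int × Int :=
  if 128 < iv.2 then ((if p.1 = none then some iv.1 else p.1), iv.1) else p

-- the per-row bright predicate on Nat indices
def pvBright (row : List Int) (k : Nat) : Bool := decide (128 < row.getD k 0)

lemma pvScanBreak_eq_find (row : List Int) (is : List Int) :
    pvScanBreak row is
      = ((is.find? (fun i => decide (128 < PySem.List.pyGetD row i 0))).getD 0) := by
  induction is with
  | nil => rfl
  | cons i is ih =>
    by_cases h : 128 < PySem.List.pyGetD row i 0 <;> simp [pvScanBreak, List.find?, h, ih]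

lemma pvEnum_eq (xs : List Int) : ∀ s : Int,
    PySem.List.enumerate xs s = (List.range xs.length).map (fun k : Nat => ((s + (k : Int)), xs.getD k 0)) := by
  induction xs with
  | nil => intro s; simp [PySem.List.enumerate_nil]
  | cons x xs ih =>
    intro s
    simp only [PySem.List.enumerate_cons, ih (s + 1), List.length_cons,
      List.range_succ_eq_map, List.map_cons, List.map_map]
    refine congrArg₂ _ (by simp) ?_
    apply List.map_congr_left
    intro k _
    simp only [Function.comp, Nat.succ_eq_add_one, List.getD_cons_succ]
    refine congrArg₂ _ (by push_cast; ring) rfl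

lemma pvFold_fst_some (l : List (Int × Int)) : ∀ (a : Int) (d : Int),
    (l.foldl pvStep (some a, d)).1 = some a := by
  induction l with
  | nil => intro a d; rfl
  | cons iv t ih =>
    intro a d
    by_cases h : 128 < iv.2 <;> simp [List.foldl_cons, pvStep, h, ih]

lemma pvFold_fst (l : List (Int × Int)) : ∀ d : Int,
    (l.foldl pvStep (none, d)).1
      = ((l.find? (fun iv => decide (128 < iv.2))).map Prod.fst) := by
  induction l with
  | nil => intro d; rfl
  | cons iv t ih =>
    intro d
    by_cases h : 128 < iv.2 <;>
      simp [List.foldl_cons, pvStep, h, ih, List.find?, pvFold_fst_some]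

lemma pvFold_snd (l : List (Int × Int)) : ∀ (o : Option Int) (d : Int),
    (l.foldl pvStep (o, d)).2
      = (((l.reverse.find? (fun iv => decide (128 < iv.2))).map Prod.fst).getD d) := by
  induction l with
  | nil => intro o d; rfl
  | cons iv t ih =>
    intro o d
    simp only [List.foldl_cons, List.reverse_cons, List.find?_append]
    rcases hf : t.reverse.find? (fun iv => decide (128 < iv.2)) with _ | w
    · by_cases h : 128 < iv.2 <;> simp [pvStep, h, ih, hf, List.find?]
    · by_cases h : 128 < iv.2 <;> simp [pvStep, h, ih, hf]

lemma pvFill_eq : ∀ (k : Nat) (s : Nat) (row : List Int), s + k ≤ row.length →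
    (PySem.List.pyRange (s : Int) ((s + k : Nat) : Int)).foldl
        (fun nr i => PySem.List.pySetD nr i 255) row
      = row.take s ++ List.replicate k 255 ++ row.drop (s + k) := by
  intro k
  induction k with
  | zero =>
    intro s row _
    simp [PySem.List.pyRange_one_eq_nil, List.take_append_drop]
  | succ k ih =>
    intro s row hlen
    have hcons : PySem.List.pyRange (s : Int) ((s + (k+1) : Nat) : Int)
        = (s : Int) :: PySem.List.pyRange ((s : Int) + 1) ((s + (k+1) : Nat) : Int) := by
      apply PySem.List.pyRange_one_cons
      push_cast; omega
    have hcast : ((s : Int) + 1) = (((s + 1 : Nat)) : Int) := by push_cast; ring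
    have hcast2 : ((s + (k+1) : Nat) : Int) = (((s + 1) + k : Nat) : Int) := by push_cast; ring
    rw [hcons, List.foldl_cons, hcast, hcast2]
    have hset : PySem.List.pySetD row (s : Int) 255 = row.set s 255 := by
      simp [PySem.List.pySetD_natCast]
    rw [hset, ih (s + 1) (row.set s 255) (by rw [List.length_set]; omega)]
    have hs : s < row.length := by omega
    have htake : (row.set s 255).take (s + 1) = row.take s ++ [255] := by
      rw [List.take_set, List.take_add_one]
      have : row[s]? = some row[s] := List.getElem?_eq_getElem hs
      rw [this]
      have hlt : (row.take s).length = s := by simp [List.length_take, Nat.min_eq_left (Nat.le_of_lt hs)]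
      calc (row.take s ++ [row[s]]).set s 255
          = row.take s ++ ([row[s]].set (s - (row.take s).length) 255) := by
            apply List.set_append_right
            omega
        _ = row.take s ++ [255] := by rw [hlt]; simp
    have hdrop : (row.set s 255).drop (s + 1 + k) = row.drop (s + 1 + k) := by
      rw [List.drop_set, if_pos (by omega)]
    rw [htake, hdrop]
    have : s + 1 + k = s + (k + 1) := by omega
    rw [this]
    simp [List.replicate_succ, List.append_assoc]

lemma pvFindNone_rev {row : List Int} {n : Nat}
    (h : (List.range n).find? (pvBright row) = none) :
    (List.range n).reverse.find? (pvBright row) = none := by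
  rw [List.find?_eq_none] at h ⊢
  intro x hx
  exact h x (List.mem_reverse.mp hx)

lemma pvFind_le {row : List Int} {n s l : Nat}
    (hF : (List.range n).find? (pvBright row) = some s)
    (hl : pvBright row l = true) (_hln : l < n) : s ≤ l := by
  rw [List.find?_eq_some_iff_getElem] at hF
  obtain ⟨hps, i, hi, heq, hmin⟩ := hF
  simp [List.getElem_range] at heq
  subst heq
  by_contra hlt
  have := hmin l (by omega)
  simp [List.getElem_range] at this
  rw [hl] at this
  exact absurd this (by simp)

lemma pvFind_mem {row : List Int} {n l : Nat}
    (hL : (List.range n).reverse.find? (pvBright row) = some l) :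
    l < n ∧ pvBright row l = true := by
  have hmem := List.find?_some hL
  have hml : l ∈ (List.range n).reverse := List.mem_of_find?_eq_some hL
  rw [List.mem_reverse, List.mem_range] at hml
  exact ⟨hml, hmem⟩

-- the per-row equality: A's three scans + fill loop = B's one pass + slice splice
lemma pvRow_eq (row : List Int) :
    (PySem.List.pyRange (pvScanBreak row (PySem.List.pyRange 0 row.length))
        (pvScanBreak row (PySem.List.pyRange 0 row.length).reverse)).foldl
      (fun nr i => PySem.List.pySetD nr i 255) row
    = pvFillRow row := by
  -- reduce both sides to find? over (List.range n) with predicate pvBright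
  have hrange : PySem.List.pyRange 0 (row.length : Int)
      = (List.range row.length).map (fun k : Nat => (k : Int)) := PySem.List.pyRange_zero_nat _
  have hApred : ∀ is : List Nat,
      (is.map (fun k : Nat => (k : Int))).find? (fun i => decide (128 < PySem.List.pyGetD row i 0))
        = (is.find? (pvBright row)).map (fun k : Nat => (k : Int)) := by
    intro is
    have hc : ((fun i => decide (128 < PySem.List.pyGetD row i 0)) ∘ (fun k : Nat => (k : Int)))
        = pvBright row := by
      funext k
      simp [Function.comp, pvBright, PySem.List.pyGetD_natCast]
    rw [List.find?_map, hc]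
  have hA1 : pvScanBreak row (PySem.List.pyRange 0 row.length)
      = (((List.range row.length).find? (pvBright row)).map (fun k : Nat => (k : Int))).getD 0 := by
    rw [hrange, pvScanBreak_eq_find, hApred]
  have hA2 : pvScanBreak row (PySem.List.pyRange 0 row.length).reverse
      = (((List.range row.length).reverse.find? (pvBright row)).map (fun k : Nat => (k : Int))).getD 0 := by
    rw [hrange, ← List.map_reverse, pvScanBreak_eq_find, hApred]
  -- B's pass
  have henum : PySem.List.enumerate row
      = (List.range row.length).map (fun k : Nat => ((k : Int), row.getD k 0)) := by
    rw [pvEnum_eq row 0]; simp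
  have hBpred : ∀ is : List Nat,
      ((is.map (fun k : Nat => ((k : Int), row.getD k 0))).find? (fun iv => decide (128 < iv.2))).map Prod.fst
        = (is.find? (pvBright row)).map (fun k : Nat => (k : Int)) := by
    intro is
    rw [List.find?_map]
    have : ((fun iv : Int × Int => decide (128 < iv.2)) ∘ (fun k : Nat => ((k : Int), row.getD k 0)))
        = pvBright row := by
      funext k; simp [Function.comp, pvBright]
    rw [this, Option.map_map]
    rfl
  have hBstep : (PySem.List.enumerate row).foldl
      (fun (p : Option Int × Int) iv =>
        if 128 < iv.2 then ((if p.1 = none then some iv.1 else p.1), iv.1) else p)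
      (none, 0)
      = (PySem.List.enumerate row).foldl pvStep (none, 0) := rfl
  rw [pvFillRow, hBstep]
  have hB1 : ((PySem.List.enumerate row).foldl pvStep (none, 0)).1
      = ((List.range row.length).find? (pvBright row)).map (fun k : Nat => (k : Int)) := by
    rw [pvFold_fst, henum, hBpred]
  have hB2 : ((PySem.List.enumerate row).foldl pvStep (none, 0)).2
      = ((((List.range row.length).reverse.find? (pvBright row)).map (fun k : Nat => (k : Int))).getD 0) := by
    rw [pvFold_snd, henum, ← List.map_reverse, hBpred]
  rw [hA1, hA2]
  simp only [hB1, hB2]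
  rcases hF : (List.range row.length).find? (pvBright row) with _ | s
  · -- no bright pixel: both sides are row unchanged
    rw [pvFindNone_rev hF]
    simp [PySem.List.pyRange_one_eq_nil, PySem.List.slice_to, PySem.List.slice_from]
  · -- bright pixels exist
    rcases hL : (List.range row.length).reverse.find? (pvBright row) with _ | l
    · exfalso
      have hs := List.find?_some hF
      have hms : s ∈ List.range row.length := List.mem_of_find?_eq_some hF
      rw [List.find?_eq_none] at hL
      exact hL s (List.mem_reverse.mpr hms) hs
    · obtain ⟨hln, hpl⟩ := pvFind_mem hL
      have hsl : s ≤ l := pvFind_le hF hpl hln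
      simp only [Option.map_some, Option.getD_some]
      have hklen : s + (l - s) ≤ row.length := by omega
      have hcast : ((l : Int)) = ((s + (l - s) : Nat) : Int) := by push_cast; omega
      rw [hcast, pvFill_eq (l - s) s row hklen]
      have h1 : PySem.List.slice row none (some (s : Int)) = row.take s :=
        PySem.List.slice_to_natCast row s
      have h2 : PySem.List.slice row (some ((s + (l - s) : Nat) : Int)) none = row.drop (s + (l - s)) :=
        PySem.List.slice_from_natCast row _
      have h3 : (((s + (l - s) : Nat) : Int) - (s : Int)).toNat = l - s := by push_cast; omega
      rw [h1, h2, h3]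

-- ===== VERDICT (by name: the statement is the Claim_ definition above) =====
theorem draw_to_end_spec : Claim_equal_draw_to_end := by
  intro image_input _
  show draw_to_end image_input = draw_to_end_alt image_input
  rw [draw_to_end, draw_to_end_alt]
  rw [show (fun (new_image : List Int) (row : List Int) =>
      let start_point := pvScanBreak row (PySem.List.pyRange 0 row.length)
      let last_point := pvScanBreak row (PySem.List.pyRange 0 row.length).reverse
      let new_row := (PySem.List.pyRange start_point last_point).foldl
          (fun nr i => PySem.List.pySetD nr i 255) row
      new_image ++ new_row)
    = fun new_image row => new_image ++ pvFillRow row from funext fun _ => funext fun row => by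
      simp only []
      rw [pvRow_eq row]]
  rw [PySem.List.foldl_append_eq_flatMap]
  simp
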